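-- pv_equiv track=rewrite | github.com/nongfang55/review | source/nlp/CRFHelper.py | tag_line
-- ===== SOURCE A (Python) =====
-- def tag_line(words):
--     chars = []
--     tags = []
--     temp_word = ''
--     for word in words:
--         word = word.strip('\t ')
--         if temp_word == '':
--             bracket_pos = word.find('[')
--             w,h = word.split('/')
--             if bracket_pos == -1:
--                 if len(w) == 0: continue
--                 chars.extend(w)
--                 if h == 'ns':
--                     tags += ['S'] if len(w) == 1 else ['B'] +\
--                      ['M'] * (len(w) - 2) + ['E']
--                 else:
--                     tags += ['O'] * len(w)
--             else:
--                 w = w[bracket_pos + 1:]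
--                 temp_word += w
--         else:
--             bracket_pos = word.find(']')
--             w,h = word.split('/')
--             if bracket_pos == -1:
--                 temp_word += w
--             else:
--                 w = temp_word + w
--                 h = word[bracket_pos + 1:]
--                 temp_word = ''
--                 if len(w) == 0: continue
--                 chars.extend(w)
--                 if h == 'ns':
--                     tags += ['S'] if len(w) == 1 else ['B']\
--                      + ['M']* (len(w) - 2) + ['E']
--                 else:
--                     tags += ['O']*len(w)
--
--     assert temp_word == ''
--     return (chars,tags)
-- ===== SOURCE B (Python) =====
-- def _tag_seq(n, head):
--     if head != 'ns':
--         return ['O'] * n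
--     return ['S'] if n == 1 else ['B'] + ['M'] * (n - 2) + ['E']
--
--
-- def tag_line(words):
--     # Pass 1: resolve tokens into (text, head) segments, merging '['-groups.
--     segs = []
--     pending = ''
--     for word in words:
--         word = word.strip('\t ')
--         w, h = word.split('/')
--         if pending:
--             p = word.find(']')
--             if p == -1:
--                 pending += w
--             else:
--                 segs.append((pending + w, word[p + 1:]))
--                 pending = ''
--         else:
--             p = word.find('[')
--             if p == -1:
--                 segs.append((w, h))
--             else:
--                 pending = w[p + 1:]
--     assert not pending
--     # Pass 2: render segments into chars and tags.
--     chars = []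
--     tags = []
--     for text, head in segs:
--         if text:
--             chars += list(text)
--             tags += _tag_seq(len(text), head)
--     return (chars, tags)
-- ===== Notes on version B (the rewrite author's own statement) =====
-- stated objective: alternative
-- what changed: A's single interleaved loop (bracket state machine mixed with char/tag emission, tag code duplicated in two branches) is split into two passes: one pass resolves tokens into (text, head) segments merging '['-groups, a second pass renders chars and tags through one shared tag routine.
import Mathlib
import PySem

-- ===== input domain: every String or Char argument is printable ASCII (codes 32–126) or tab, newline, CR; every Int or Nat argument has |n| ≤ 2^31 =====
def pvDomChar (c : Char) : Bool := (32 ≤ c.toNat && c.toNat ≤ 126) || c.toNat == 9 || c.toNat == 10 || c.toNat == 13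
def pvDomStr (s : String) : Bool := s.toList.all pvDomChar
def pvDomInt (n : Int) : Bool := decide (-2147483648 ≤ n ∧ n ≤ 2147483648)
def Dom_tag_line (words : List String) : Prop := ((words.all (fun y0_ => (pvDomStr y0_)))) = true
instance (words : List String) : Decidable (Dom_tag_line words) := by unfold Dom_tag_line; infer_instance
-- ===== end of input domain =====

-- B re-decomposes A's single interleaved loop into two passes (resolve bracket groups into
-- (text, head) segments, then render chars/tags once, sharing one tag routine); same values.

-- ===== PORT A =====
-- A's loop state: (chars, tags, temp_word).  On a token that does not split into exactly
-- two parts at '/', Python raises ValueError — those inputs are outside Pre_ and the port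
-- leaves the state unchanged there.
def tagLineStepA (st : List String × List String × List Char) (word : String) :
    List String × List String × List Char :=
  let cs := PySem.Chars.stripChars word.toList ['\t', ' ']
  match st with
  | (chars, tags, tw) =>
    if tw = [] then
      let bp := PySem.Chars.find cs ['[']
      match PySem.Chars.splitOn cs ['/'] with
      | [w, h] =>
        if bp = -1 then
          if w.length = 0 then (chars, tags, tw)
          else
            (chars ++ w.map (fun c => String.ofList [c]),
             tags ++ (if h = ['n', 's'] then
                        (if w.length = 1 then ["S"]
                         else ["B"] ++ List.replicate (w.length - 2) "M" ++ ["E"])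
                      else List.replicate w.length "O"),
             tw)
        else (chars, tags, tw ++ PySem.List.slice w (some (bp + 1)) none)
      | _ => (chars, tags, tw)
    else
      let bp := PySem.Chars.find cs [']']
      match PySem.Chars.splitOn cs ['/'] with
      | [w, _h] =>
        if bp = -1 then (chars, tags, tw ++ w)
        else
          let w' := tw ++ w
          let h' := PySem.List.slice cs (some (bp + 1)) none
          if w'.length = 0 then (chars, tags, [])
          else
            (chars ++ w'.map (fun c => String.ofList [c]),
             tags ++ (if h' = ['n', 's'] then
                        (if w'.length = 1 then ["S"]
                         else ["B"] ++ List.replicate (w'.length - 2) "M" ++ ["E"])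
                      else List.replicate w'.length "O"),
             [])
      | _ => (chars, tags, tw)

def tag_line (words : List String) : List String × List String :=
  match words.foldl tagLineStepA ([], [], []) with
  | (chars, tags, _) => (chars, tags)

-- ===== PORT B =====
-- Source B's shared tag routine
def tagSeq (n : Nat) (head : List Char) : List String :=
  if ¬ head = ['n', 's'] then List.replicate n "O"
  else if n = 1 then ["S"] else ["B"] ++ List.replicate (n - 2) "M" ++ ["E"]

-- Source B pass 1 step: state (segs, pending)
def segStep (st : List (List Char × List Char) × List Char) (word : String) :
    List (List Char × List Char) × List Char :=
  let cs := PySem.Chars.stripChars word.toList ['\t', ' ']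
  match PySem.Chars.splitOn cs ['/'] with
  | [w, h] =>
    match st with
    | (segs, pending) =>
      if ¬ pending = [] then
        let p := PySem.Chars.find cs [']']
        if p = -1 then (segs, pending ++ w)
        else (segs ++ [(pending ++ w, PySem.List.slice cs (some (p + 1)) none)], [])
      else
        let p := PySem.Chars.find cs ['[']
        if p = -1 then (segs ++ [(w, h)], [])
        else (segs, PySem.List.slice w (some (p + 1)) none)
  | _ => st

-- Source B pass 2: render the segments
def renderSegs (segs : List (List Char × List Char)) : List String × List String :=
  segs.foldl
    (fun ct seg =>
      if ¬ seg.1 = [] then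
        (ct.1 ++ seg.1.map (fun c => String.ofList [c]), ct.2 ++ tagSeq seg.1.length seg.2)
      else ct)
    ([], [])

def tag_line_alt (words : List String) : List String × List String :=
  renderSegs (words.foldl segStep ([], [])).1

-- ===== PRECONDITION & SPEC =====
-- A raises ValueError when a stripped token does not split into exactly two parts at '/',
-- and AssertionError when a '['-opened group is still open at the end; Pre_ is the
-- "every token has exactly one '/' and bracket groups are balanced" condition (tracked by
-- the minimal open/closed state, since an opener whose captured text is empty leaves the
-- group closed in A).  B raises the same exceptions on exactly these inputs.
def preState (words : List String) : Option (List Char) :=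
  words.foldl
    (fun st word =>
      match st with
      | none => none
      | some tw =>
        let cs := PySem.Chars.stripChars word.toList ['\t', ' ']
        match PySem.Chars.splitOn cs ['/'] with
        | [w, _] =>
          if tw = [] then
            let p := PySem.Chars.find cs ['[']
            if p = -1 then some [] else some (PySem.List.slice w (some (p + 1)) none)
          else
            let p := PySem.Chars.find cs [']']
            if p = -1 then some (tw ++ w) else some []
        | _ => none)
    (some [])

def Pre_tag_line (words : List String) : Prop := preState words = some []
instance (words : List String) : Decidable (Pre_tag_line words) := by
  unfold Pre_tag_line; infer_instance

def pvWitness_tag_line : List String := ["ab/ns", "cd/v", "[x/a", "y/b", "z]/c"]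

def Spec_tag_line (words : List String) (out : List String × List String) : Prop := out = tag_line_alt words
instance (words : List String) (out : List String × List String) : Decidable (Spec_tag_line words out) := by unfold Spec_tag_line; infer_instance

-- ===== CLAIM (what is proved, stated in full; the proofs are below) =====
def Claim_equal_tag_line : Prop := ∀ (words : List String), Dom_tag_line words → Pre_tag_line words → Spec_tag_line words (tag_line words)

-- ===== LEMMAS AND PROOFS =====

-- one render step appended at the back
lemma renderSegs_append (segs : List (List Char × List Char)) (s : List Char × List Char) :
    renderSegs (segs ++ [s]) =
      if ¬ s.1 = [] then
        ((renderSegs segs).1 ++ s.1.map (fun c => String.ofList [c]),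
         (renderSegs segs).2 ++ tagSeq s.1.length s.2)
      else renderSegs segs := by
  simp [renderSegs, List.foldl_append]

-- simulation: A's fold state is B's fold state, rendered
lemma fold_sim (ws : List String) :
    ∀ (segs : List (List Char × List Char)) (tw : List Char),
      ws.foldl tagLineStepA ((renderSegs segs).1, (renderSegs segs).2, tw) =
        ((renderSegs (ws.foldl segStep (segs, tw)).1).1,
         (renderSegs (ws.foldl segStep (segs, tw)).1).2,
         (ws.foldl segStep (segs, tw)).2) := by
  induction ws with
  | nil => intro segs tw; simp
  | cons word rest ih =>
    intro segs tw
    have hstep :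
        tagLineStepA ((renderSegs segs).1, (renderSegs segs).2, tw) word =
          ((renderSegs (segStep (segs, tw) word).1).1,
           (renderSegs (segStep (segs, tw) word).1).2,
           (segStep (segs, tw) word).2) := by
      simp only [tagLineStepA, segStep]
      rcases hsp : PySem.Chars.splitOn (PySem.Chars.stripChars word.toList ['\t', ' ']) ['/'] with
        _ | ⟨w, _ | ⟨h, _ | _⟩⟩ <;>
        by_cases htw : tw = [] <;>
        simp [htw] <;>
        split_ifs <;>
        simp_all [renderSegs_append] <;>
        simp_all [tagSeq]
    rw [List.foldl_cons, List.foldl_cons, hstep, ih]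

theorem tag_line_eq_alt (words : List String) : tag_line words = tag_line_alt words := by
  have h := fold_sim words [] []
  have h0 : renderSegs [] = (([] : List String), ([] : List String)) := rfl
  rw [h0] at h
  simp [tag_line, tag_line_alt, h]

-- ===== VERDICT (by name: the statement is the Claim_ definition above) =====
theorem tag_line_spec : Claim_equal_tag_line := by
  intro words _ _
  unfold Spec_tag_line
  exact tag_line_eq_alt words
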